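-- pv_equiv track=rewrite | github.com/n1ka1-4/GOA-homeworks | day100/homework/lesson0.py | bits_battle
-- ===== SOURCE A (Python) =====
-- def bits_battle(numbers):
--     odd = []
--     even = []
--     [odd.append(bin(i)[2:].count("1")) if i % 2 == 1 else even.append(bin(i)[2:].count("0")) for i in [i for i in numbers if i != 0]]
--     if sum(odd) > sum(even):
--         return "odds win"
--     elif sum(even) > sum(odd):
--         return "evens win"
--     else:
--         return "tie"
-- ===== SOURCE B (Python) =====
-- def bits_battle(numbers):
--     # Divide-and-conquer over the list computing one signed net score; per-number
--     # bit digits counted by recursive halving arithmetic instead of bin() strings.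
--     def digits(m):
--         # (ones, zeros) of the binary representation of m, for m >= 1
--         if m == 1:
--             return (1, 0)
--         o, z = digits(m // 2)
--         return (o + m % 2, z + 1 - m % 2)
--
--     def net(ns):
--         if not ns:
--             return 0
--         if len(ns) == 1:
--             i = ns[0]
--             if i == 0:
--                 return 0
--             o, z = digits(i if i >= 0 else -i)
--             return o if i % 2 else -z
--         mid = len(ns) // 2
--         return net(ns[:mid]) + net(ns[mid:])
--
--     s = net(numbers)
--     return "tie" if s == 0 else ("odds win" if s > 0 else "evens win")
-- ===== Notes on version B (the rewrite author's own statement) =====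
-- stated objective: alternative
-- what changed: Replaces the two lists filled by bin()-string .count() in a side-effecting comprehension with a divide-and-conquer recursion that splits the list in halves and sums one signed net score, counting each number's binary ones/zeros by recursive halving arithmetic instead of bin() strings.
import Mathlib
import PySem

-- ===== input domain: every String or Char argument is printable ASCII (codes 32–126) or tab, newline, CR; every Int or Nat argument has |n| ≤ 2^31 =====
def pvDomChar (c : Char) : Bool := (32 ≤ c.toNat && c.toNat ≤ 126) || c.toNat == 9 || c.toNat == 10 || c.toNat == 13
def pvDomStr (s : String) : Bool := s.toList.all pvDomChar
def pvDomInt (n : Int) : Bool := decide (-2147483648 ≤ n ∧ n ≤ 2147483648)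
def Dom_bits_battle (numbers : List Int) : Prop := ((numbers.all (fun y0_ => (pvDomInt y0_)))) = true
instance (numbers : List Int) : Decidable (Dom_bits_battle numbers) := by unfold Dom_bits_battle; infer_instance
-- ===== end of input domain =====

-- B replaces A's two bin()-string-count lists by a divide-and-conquer recursion over the list
-- keeping one signed net score, with per-number bit digits counted by recursive halving
-- arithmetic; objective: alternative decomposition (no speed claim).

-- ===== PORT A =====
-- bin(n) is hand-ported here (PySem has no bin): exact transliteration of CPython's output
-- '0b…'/'-0b…'/'0b0' as a List Char; [2:] is List.drop 2, str.count of a 1-char pattern is List.count.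
def pyBinDigits (n : Nat) : List Char :=
  if h : n = 0 then []
  else pyBinDigits (n / 2) ++ [if n % 2 = 1 then '1' else '0']
decreasing_by exact Nat.div_lt_self (Nat.pos_of_ne_zero h) one_lt_two

def pyBin (i : Int) : List Char :=
  if i = 0 then ['0', 'b', '0']
  else if i < 0 then '-' :: '0' :: 'b' :: pyBinDigits i.natAbs
  else '0' :: 'b' :: pyBinDigits i.natAbs

-- the body of A's side-effecting comprehension: append to odd or to even
def bits_battle_step (p : List Int × List Int) (i : Int) : List Int × List Int :=
  if PySem.Int.mod i 2 = 1 then (p.1 ++ [(((pyBin i).drop 2).count '1' : Int)], p.2)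
  else (p.1, p.2 ++ [(((pyBin i).drop 2).count '0' : Int)])

def bits_battle (numbers : List Int) : String :=
  let p := (numbers.filter (fun i => i != 0)).foldl bits_battle_step ([], [])
  if p.1.sum > p.2.sum then "odds win"
  else if p.2.sum > p.1.sum then "evens win"
  else "tie"

-- ===== PORT B =====
-- Source B's digits(m): (ones, zeros) of m's binary digits by recursive halving; only called with
-- m ≥ 1 in Source B, so the m = 0 branch (folded into 'm ≤ 1') is unreachable there.
def pyDigits (m : Nat) : Int × Int :=
  if m ≤ 1 then (1, 0)
  else
    let p := pyDigits (m / 2)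
    (p.1 + (m % 2 : Nat), p.2 + 1 - (m % 2 : Nat))
decreasing_by exact Nat.div_lt_self (by omega) one_lt_two

-- Source B's net(ns): divide-and-conquer over the list, one signed net score
def pyNet (ns : List Int) : Int :=
  match ns with
  | [] => 0
  | [i] =>
    if i = 0 then 0
    else
      let p := pyDigits (if i ≥ 0 then i else -i).natAbs
      if PySem.Int.mod i 2 ≠ 0 then p.1 else -p.2
  | x :: y :: l =>
    let mid := (x :: y :: l).length / 2
    pyNet ((x :: y :: l).take mid) + pyNet ((x :: y :: l).drop mid)
termination_by ns.length
decreasing_by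
  · simp only [List.length_take, List.length_cons]; omega
  · simp only [List.length_drop, List.length_cons]; omega

def bits_battle_alt (numbers : List Int) : String :=
  let s := pyNet numbers
  if s = 0 then "tie"
  else if s > 0 then "odds win"
  else "evens win"

-- ===== PRECONDITION & SPEC =====
def Spec_bits_battle (numbers : List Int) (out : String) : Prop := out = bits_battle_alt numbers
instance (numbers : List Int) (out : String) : Decidable (Spec_bits_battle numbers out) := by unfold Spec_bits_battle; infer_instance

-- ===== CLAIM (what is proved, stated in full; the proofs are below) =====
def Claim_equal_bits_battle : Prop := ∀ (numbers : List Int), Dom_bits_battle numbers → Spec_bits_battle numbers (bits_battle numbers)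

-- ===== LEMMAS AND PROOFS =====

-- per-element contribution (proof-only helper)
def contrib (i : Int) : Int :=
  if i = 0 then 0
  else if PySem.Int.mod i 2 ≠ 0 then (pyDigits i.natAbs).1 else -(pyDigits i.natAbs).2

-- pyDigits counts exactly the '1's and '0's of the digit string A counts
theorem pyDigits_counts (m : Nat) (hm : 1 ≤ m) :
    (pyDigits m).1 = ((pyBinDigits m).count '1' : Int) ∧
    (pyDigits m).2 = ((pyBinDigits m).count '0' : Int) := by
  induction m using Nat.strong_induction_on with
  | _ m ih =>
    by_cases h1 : m = 1
    · subst h1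
      have e0 : pyBinDigits 0 = [] := by rw [pyBinDigits]; norm_num
      have e1 : pyBinDigits 1 = ['1'] := by rw [pyBinDigits, e0]; norm_num
      have d1 : pyDigits 1 = (1, 0) := by rw [pyDigits]; norm_num
      simp [e1, d1]
    · have h2 : 2 ≤ m := by omega
      have hhalf : 1 ≤ m / 2 := Nat.one_le_div_iff (by omega) |>.2 h2
      obtain ⟨i1, i0⟩ := ih (m / 2) (Nat.div_lt_self (by omega) one_lt_two) hhalf
      rw [pyDigits, pyBinDigits, if_neg (by omega), dif_neg (by omega)]
      by_cases hp : m % 2 = 1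
      · constructor
        · simp [hp, List.count_append, i1]
        · simp [hp, List.count_append, i0]
      · have hp0 : m % 2 = 0 := by omega
        constructor
        · simp [hp0, List.count_append, i1]
        · simp [hp0, List.count_append, i0]

-- dropping pyBin's 2-char prefix leaves the digit string up to a 'b' that counts neither char
theorem dropA_count (i : Int) (h : i ≠ 0) (c : Char) (hc : c ≠ 'b') :
    ((pyBin i).drop 2).count c = (pyBinDigits i.natAbs).count c := by
  by_cases hneg : i < 0
  · simp [pyBin, if_neg h, if_pos hneg, Ne.symm hc]
  · simp [pyBin, if_neg h, if_neg hneg]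

-- A's stored value for i equals |contrib i|, signed by parity
theorem contrib_odd (i : Int) (h : i ≠ 0) (hm : PySem.Int.mod i 2 = 1) :
    contrib i = (((pyBin i).drop 2).count '1' : Int) := by
  have hne : PySem.Int.mod i 2 ≠ 0 := by rw [hm]; norm_num
  rw [contrib, if_neg h, if_pos hne, dropA_count i h '1' (by decide),
    (pyDigits_counts i.natAbs (by omega)).1]

theorem contrib_even (i : Int) (h : i ≠ 0) (hm : PySem.Int.mod i 2 = 0) :
    contrib i = -(((pyBin i).drop 2).count '0' : Int) := by
  have hne : ¬ PySem.Int.mod i 2 ≠ 0 := by rw [hm]; norm_num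
  rw [contrib, if_neg h, if_neg hne, dropA_count i h '0' (by decide),
    (pyDigits_counts i.natAbs (by omega)).2]

-- A's fold computes the running (odd-sum, even-sum); its difference is the contrib sum
theorem fold_rel (l : List Int) : ∀ (o e : List Int),
    ((l.filter (fun i => i != 0)).foldl bits_battle_step (o, e)).1.sum -
    ((l.filter (fun i => i != 0)).foldl bits_battle_step (o, e)).2.sum
      = o.sum - e.sum + (l.map contrib).sum := by
  induction l with
  | nil => intro o e; simp
  | cons i l ih =>
    intro o e
    by_cases h0 : i = 0
    · subst h0
      simp only [List.filter_cons, List.map_cons, List.sum_cons]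
      norm_num [contrib, ih]
    · have hfilter : ((i :: l).filter (fun i => i != 0)) = i :: l.filter (fun i => i != 0) := by
        simp [h0]
      rw [hfilter, List.foldl_cons]
      rcases PySem.Int.mod_two_eq i with hm | hm
      · have hne1 : ¬ (PySem.Int.mod i 2 = 1) := by rw [hm]; norm_num
        rw [show bits_battle_step (o, e) i
            = (o, e ++ [(((pyBin i).drop 2).count '0' : Int)]) from by
              unfold bits_battle_step; rw [if_neg hne1]]
        rw [ih]
        simp only [List.map_cons, List.sum_cons, List.sum_append, List.sum_nil]
        rw [contrib_even i h0 hm]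
        ring
      · rw [show bits_battle_step (o, e) i
            = (o ++ [(((pyBin i).drop 2).count '1' : Int)], e) from by
              unfold bits_battle_step; rw [if_pos hm]]
        rw [ih]
        simp only [List.map_cons, List.sum_cons, List.sum_append, List.sum_nil]
        rw [contrib_odd i h0 hm]
        ring

-- B's divide-and-conquer computes the contrib sum
theorem pyNet_eq_aux (n : Nat) : ∀ (ns : List Int), ns.length ≤ n → pyNet ns = (ns.map contrib).sum := by
  induction n with
  | zero =>
    intro ns h
    match ns with
    | [] => simp [pyNet]
  | succ n ih =>
    intro ns h
    match ns with
    | [] => simp [pyNet]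
    | [i] =>
      rw [pyNet]
      by_cases h0 : i = 0
      · simp [h0, contrib]
      · have habs : (if i ≥ 0 then i else -i).natAbs = i.natAbs := by
          split_ifs <;> simp
        simp only [if_neg h0, habs, List.map_cons, List.map_nil, List.sum_cons, List.sum_nil,
          contrib]
        ring
    | x :: y :: l =>
      rw [pyNet]
      simp only [List.length_cons] at h
      have hmid : 1 ≤ (x :: y :: l).length / 2 ∧ (x :: y :: l).length / 2 < (x :: y :: l).length := by
        simp only [List.length_cons]; omega
      rw [ih _ (by simp only [List.length_take, List.length_cons]; omega),
          ih _ (by simp only [List.length_drop, List.length_cons]; omega),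
          ← List.sum_append, ← List.map_append, List.take_append_drop]

theorem pyNet_eq (ns : List Int) : pyNet ns = (ns.map contrib).sum :=
  pyNet_eq_aux ns.length ns le_rfl

-- ===== VERDICT (by name: the statement is the Claim_ definition above) =====
theorem bits_battle_spec : Claim_equal_bits_battle := by
  intro numbers _
  show bits_battle numbers = bits_battle_alt numbers
  unfold bits_battle bits_battle_alt
  have hA := fold_rel numbers [] []
  have hB := pyNet_eq numbers
  simp only [List.sum_nil, sub_zero, zero_add] at hA
  simp only [gt_iff_lt]
  rw [hB]
  split_ifs with h1 h2 h3 h4 h5 h6 h7 <;> first | rfl | omega
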